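-- pv_equiv track=rewrite | github.com/rl0425/Algorithm | Second/DFS/2468.py | maze_dfs
-- ===== SOURCE A (Python) =====
-- from collections import deque
--
-- def maze_dfs(arr, waterLevel):
--     visited = set()
--     island = 0
--     def dfs(arr, start):
--         queue = deque()
--
--         x, y = start[0], start[1]
--         location = [(1, 0), (0, 1), (-1, 0), (0, -1)]
--         queue.append((x, y))
--
--         while queue:
--             x, y = queue.popleft()
--             for dx, dy in location:
--                 new_x, new_y = dx + x, dy + y
--                 if (new_x, new_y) not in visited and new_x >= 0 and new_y >= 0 and new_x <= len(arr)-1 and new_y <= len(arr)-1: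
--                     if arr[new_x][new_y] > waterLevel:
--                         queue.append((new_x, new_y))
--                         visited.add((new_x, new_y))
--         return True
--
--     for i in range(len(arr)):
--         for j in range(len(arr)):
--             if arr[i][j] > waterLevel and (i, j) not in visited:
--                 dfs(arr, (i, j))
--                 island += 1
--     return island
-- ===== SOURCE B (Python) =====
-- def maze_dfs(arr, waterLevel):
--     # Counts connected components of above-water cells by a different decomposition:
--     # a cell is counted iff it is the lexicographically smallest cell of its component,
--     # where the component is computed by frontier-set saturation (no BFS queue, no shared visited).
--     n = len(arr)
--
--     def closure(start):
--         comp = {start}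
--         for _ in range(n * n):
--             frontier = set()
--             for (x, y) in comp:
--                 for nx, ny in ((x + 1, y), (x - 1, y), (x, y + 1), (x, y - 1)):
--                     if 0 <= nx < n and 0 <= ny < n and (nx, ny) not in comp and arr[nx][ny] > waterLevel:
--                         frontier.add((nx, ny))
--             if not frontier:
--                 break
--             comp |= frontier
--         return comp
--
--     count = 0
--     for i in range(n):
--         for j in range(n):
--             if arr[i][j] > waterLevel and all(t >= (i, j) for t in closure((i, j))):
--                 count += 1
--     return count
-- ===== Notes on version B (the rewrite author's own statement) =====
-- stated objective: alternative
-- what changed: A flood-fills with a shared visited set and a BFS deque, counting one island per unvisited above-water start; B has no visited set or queue at all: it computes each cell's component by frontier-set saturation to a fixpoint and counts exactly the cells that are the lexicographic minimum of their component.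
import Mathlib
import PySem

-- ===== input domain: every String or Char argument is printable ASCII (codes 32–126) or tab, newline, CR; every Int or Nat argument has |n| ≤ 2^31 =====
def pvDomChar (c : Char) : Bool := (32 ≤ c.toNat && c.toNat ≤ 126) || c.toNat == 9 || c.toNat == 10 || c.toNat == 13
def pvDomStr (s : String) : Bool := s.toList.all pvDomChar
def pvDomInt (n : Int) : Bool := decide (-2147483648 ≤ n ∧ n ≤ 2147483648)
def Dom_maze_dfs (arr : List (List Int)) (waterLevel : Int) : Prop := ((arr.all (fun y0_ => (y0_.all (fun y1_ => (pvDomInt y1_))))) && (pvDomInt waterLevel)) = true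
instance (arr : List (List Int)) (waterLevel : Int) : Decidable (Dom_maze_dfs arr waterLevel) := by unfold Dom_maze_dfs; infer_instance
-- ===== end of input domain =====

-- B re-implements the component count by a different decomposition: instead of A's shared
-- visited-set + BFS queue flood fill, B counts the cells that are the lexicographically
-- smallest of their connected component, computing each component by frontier-set saturation.
-- Objective: alternative (a genuinely different algorithm; not claimed faster).

-- ===== PORT A =====
def valA (arr : List (List Int)) (x y : Int) : Int :=
  (PySem.List.pyGet? ((PySem.List.pyGet? arr x).getD []) y).getD 0

def dfsStep (arr : List (List Int)) (w : Int) (x y : Int)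
    (st : PySem.Set (Int × Int) × List (Int × Int)) (d : Int × Int) :
    PySem.Set (Int × Int) × List (Int × Int) :=
  -- nx = dx + x, ny = dy + y, written out
  if !(st.1.contains (d.1 + x, d.2 + y)) && decide (d.1 + x ≥ 0) && decide (d.2 + y ≥ 0) &&
     decide (d.1 + x ≤ (arr.length : Int) - 1) && decide (d.2 + y ≤ (arr.length : Int) - 1) &&
     decide (valA arr (d.1 + x) (d.2 + y) > w)
  then (st.1.add (d.1 + x, d.2 + y), st.2 ++ [(d.1 + x, d.2 + y)])
  else st

def gridA (n : Nat) : List (Int × Int) :=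
  (List.range n).flatMap (fun i : Nat => (List.range n).map (fun j : Nat => ((i : Int), (j : Int))))

def unvisA (n : Nat) (V : PySem.Set (Int × Int)) : Nat :=
  ((gridA n).filter (fun c => !(V.contains c))).length

theorem filter_len_le {α : Type} (t : List α) (p q : α → Bool)
    (himp : ∀ x, q x = true → p x = true) :
    (t.filter q).length ≤ (t.filter p).length := by
  induction t with
  | nil => simp
  | cons a l ih =>
    by_cases h : q a = true
    · rw [List.filter_cons, List.filter_cons, if_pos h, if_pos (himp a h)]
      exact Nat.succ_le_succ ih
    · rw [List.filter_cons, if_neg (by simp [h])]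
      rw [List.filter_cons]
      split
      · exact Nat.le_succ_of_le ih
      · exact ih

theorem filter_len_lt {α : Type} (L : List α) (p q : α → Bool)
    (himp : ∀ x, q x = true → p x = true) (c : α) (hc : c ∈ L)
    (hpc : p c = true) (hqc : q c = false) :
    (L.filter q).length < (L.filter p).length := by
  induction L with
  | nil => cases hc
  | cons a t ih =>
    rcases List.mem_cons.1 hc with rfl | hct
    · rw [List.filter_cons, List.filter_cons, if_pos hpc, if_neg (by simp [hqc])]
      exact Nat.lt_succ_of_le (filter_len_le t p q himp)
    · by_cases hqa : q a = true
      · simp only [List.filter_cons, hqa, himp a hqa]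
        exact Nat.succ_lt_succ (ih hct)
      · by_cases hpa : p a = true
        · simp only [List.filter_cons, hqa, hpa, Bool.false_eq_true, if_false]
          exact Nat.lt_succ_of_lt (ih hct)
        · simp only [List.filter_cons, hqa, hpa, Bool.false_eq_true, if_false]
          exact ih hct

theorem set_contains_false_iff {α : Type} [BEq α] [LawfulBEq α] (s : PySem.Set α) (x : α) :
    PySem.Set.contains s x = false ↔ x ∉ s := by
  constructor
  · intro h hm
    rw [(PySem.Set.contains_iff _ _).2 hm] at h
    cases h
  · intro hm
    cases hq : PySem.Set.contains s x
    · rfl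
    · exact absurd ((PySem.Set.contains_iff _ _).1 hq) hm

theorem mem_gridA (n : Nat) (c : Int × Int) :
    c ∈ gridA n ↔ 0 ≤ c.1 ∧ c.1 < n ∧ 0 ≤ c.2 ∧ c.2 < n := by
  obtain ⟨a, b⟩ := c
  constructor
  · intro h
    unfold gridA at h
    obtain ⟨i, hi, h2⟩ := List.mem_flatMap.1 h
    obtain ⟨j, hj, heq⟩ := List.mem_map.1 h2
    rw [List.mem_range] at hi hj
    rw [Prod.mk.injEq] at heq
    obtain ⟨rfl, rfl⟩ := heq
    refine ⟨?_, ?_, ?_, ?_⟩ <;> omega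
  · rintro ⟨h1, h2, h3, h4⟩
    unfold gridA
    exact List.mem_flatMap.2 ⟨a.toNat, List.mem_range.2 (by omega),
      List.mem_map.2 ⟨b.toNat, List.mem_range.2 (by omega), by simp only [Prod.mk.injEq]; omega⟩⟩

-- one full step of dfsStep does not increase the termination measure
theorem dfsStep_measure (arr : List (List Int)) (w : Int) (x y : Int)
    (st : PySem.Set (Int × Int) × List (Int × Int)) (d : Int × Int) :
    (dfsStep arr w x y st d).2.length + 5 * unvisA arr.length (dfsStep arr w x y st d).1 ≤
      st.2.length + 5 * unvisA arr.length st.1 := by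
  unfold dfsStep
  split
  · rename_i h
    simp only [Bool.and_eq_true, Bool.not_eq_true', decide_eq_true_eq] at h
    obtain ⟨⟨⟨⟨⟨hnc, h0x⟩, h0y⟩, hx⟩, hy⟩, hv⟩ := h
    simp only [List.length_append, List.length_cons, List.length_nil]
    have hmem : (d.1 + x, d.2 + y) ∈ gridA arr.length := by
      rw [mem_gridA]; exact ⟨h0x, by omega, h0y, by omega⟩
    have hlt : unvisA arr.length (st.1.add (d.1 + x, d.2 + y)) < unvisA arr.length st.1 := by
      apply filter_len_lt
      · intro z hz
        rw [Bool.not_eq_true', set_contains_false_iff] at hz ⊢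
        exact fun hm => hz ((PySem.Set.mem_add _ _ _).2 (Or.inl hm))
      · exact hmem
      · rw [Bool.not_eq_true', set_contains_false_iff]
        exact (set_contains_false_iff _ _).1 hnc
      · have hm : (d.1 + x, d.2 + y) ∈ st.1.add (d.1 + x, d.2 + y) :=
          (PySem.Set.mem_add _ _ _).2 (Or.inr rfl)
        simp only [Bool.not_eq_false']
        exact (PySem.Set.contains_iff _ _).2 hm
    omega
  · exact le_refl _

theorem dfsFold_measure (arr : List (List Int)) (w : Int) (x y : Int) :
    ∀ (ds : List (Int × Int)) (st : PySem.Set (Int × Int) × List (Int × Int)),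
    (ds.foldl (dfsStep arr w x y) st).2.length + 5 * unvisA arr.length (ds.foldl (dfsStep arr w x y) st).1 ≤
      st.2.length + 5 * unvisA arr.length st.1 := by
  intro ds
  induction ds with
  | nil => intro st; exact le_refl _
  | cons d t ih =>
    intro st
    calc (List.foldl (dfsStep arr w x y) (dfsStep arr w x y st d) t).2.length +
          5 * unvisA arr.length (List.foldl (dfsStep arr w x y) (dfsStep arr w x y st d) t).1
        ≤ (dfsStep arr w x y st d).2.length + 5 * unvisA arr.length (dfsStep arr w x y st d).1 := ih _
      _ ≤ st.2.length + 5 * unvisA arr.length st.1 := dfsStep_measure arr w x y st d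

-- the body of A's inner `for dx, dy in location` loop, one BFS dequeue step
def scanA (arr : List (List Int)) (w : Int) (x y : Int)
    (st : PySem.Set (Int × Int) × List (Int × Int)) :
    PySem.Set (Int × Int) × List (Int × Int) :=
  [((1 : Int), (0 : Int)), (0, 1), (-1, 0), (0, -1)].foldl (dfsStep arr w x y) st

def dfsLoop (arr : List (List Int)) (w : Int) :
    List (Int × Int) → PySem.Set (Int × Int) → PySem.Set (Int × Int)
  | [], V => V
  | (x, y) :: rest, V => dfsLoop arr w (scanA arr w x y (V, rest)).2 (scanA arr w x y (V, rest)).1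
termination_by Q V => Q.length + 5 * unvisA arr.length V
decreasing_by
  have h := dfsFold_measure arr w x y [((1 : Int), (0 : Int)), (0, 1), (-1, 0), (0, -1)] (V, rest)
  dsimp only at h
  simp only [scanA, List.length_cons]
  omega

def maze_dfs (arr : List (List Int)) (waterLevel : Int) : Int :=
  ((PySem.List.pyRange 0 (arr.length : Int)).foldl (fun (st : PySem.Set (Int × Int) × Int) i =>
    (PySem.List.pyRange 0 (arr.length : Int)).foldl (fun (st : PySem.Set (Int × Int) × Int) j =>
      if decide (valA arr i j > waterLevel) && !(st.1.contains (i, j)) then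
        (dfsLoop arr waterLevel [(i, j)] st.1, st.2 + 1)
      else st) st) (PySem.Set.empty, 0)).2

-- ===== PORT B =====
def nbrsB (c : Int × Int) : List (Int × Int) :=
  [(c.1 + 1, c.2), (c.1 - 1, c.2), (c.1, c.2 + 1), (c.1, c.2 - 1)]

def frontierB (arr : List (List Int)) (w : Int) (comp : PySem.Set (Int × Int)) :
    PySem.Set (Int × Int) :=
  comp.foldl (fun f c =>
    (nbrsB c).foldl (fun (f : PySem.Set (Int × Int)) nb =>
      if decide (0 ≤ nb.1) && decide (nb.1 < (arr.length : Int)) &&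
         decide (0 ≤ nb.2) && decide (nb.2 < (arr.length : Int)) &&
         !(comp.contains nb) && decide (valA arr nb.1 nb.2 > w)
      then f.add nb else f) f) PySem.Set.empty

def closureB (arr : List (List Int)) (w : Int) :
    Nat → PySem.Set (Int × Int) → PySem.Set (Int × Int)
  | 0, comp => comp
  | k + 1, comp =>
      let f := frontierB arr w comp
      if f.isEmpty then comp else closureB arr w k (PySem.Set.union comp f)

-- Python's tuple ≥ on int pairs, lexicographic
def tupGe (t c : Int × Int) : Bool :=
  decide (c.1 < t.1 ∨ (c.1 = t.1 ∧ c.2 ≤ t.2))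

def maze_dfs_alt (arr : List (List Int)) (waterLevel : Int) : Int :=
  (PySem.List.pyRange 0 (arr.length : Int)).foldl (fun cnt i =>
    (PySem.List.pyRange 0 (arr.length : Int)).foldl (fun (cnt : Int) j =>
      if decide (valA arr i j > waterLevel) &&
         (closureB arr waterLevel (arr.length * arr.length) [(i, j)]).all
           (fun t => tupGe t (i, j))
      then cnt + 1 else cnt) cnt) 0


-- ===== PRECONDITION & SPEC =====
-- Pre_ excludes exactly the inputs where Python A raises IndexError: A indexes every row
-- with column indices up to len(arr)-1, so every row must have at least len(arr) entries.
def Pre_maze_dfs (arr : List (List Int)) (_waterLevel : Int) : Prop :=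
  ∀ row ∈ arr, arr.length ≤ row.length
instance (arr : List (List Int)) (waterLevel : Int) : Decidable (Pre_maze_dfs arr waterLevel) := by
  unfold Pre_maze_dfs; infer_instance
def pvWitness_maze_dfs : List (List Int) × Int := ([[1, 0], [0, 2]], 0)
def Spec_maze_dfs (arr : List (List Int)) (waterLevel : Int) (out : Int) : Prop :=
  out = maze_dfs_alt arr waterLevel
instance (arr : List (List Int)) (waterLevel : Int) (out : Int) : Decidable (Spec_maze_dfs arr waterLevel out) := by
  unfold Spec_maze_dfs; infer_instance

-- ===== CLAIM (what is proved, stated in full; the proofs are below) =====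
def Claim_equal_maze_dfs : Prop := ∀ (arr : List (List Int)) (waterLevel : Int), Dom_maze_dfs arr waterLevel → Pre_maze_dfs arr waterLevel → Spec_maze_dfs arr waterLevel (maze_dfs arr waterLevel)

-- ===== LEMMAS AND PROOFS =====
-- ===== math layer =====
def Above (arr : List (List Int)) (w : Int) (c : Int × Int) : Prop :=
  0 ≤ c.1 ∧ c.1 < (arr.length : Int) ∧ 0 ≤ c.2 ∧ c.2 < (arr.length : Int) ∧ valA arr c.1 c.2 > w

def Adj (c d : Int × Int) : Prop := d ∈ nbrsB c

def Step (arr : List (List Int)) (w : Int) (c d : Int × Int) : Prop :=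
  Above arr w c ∧ Above arr w d ∧ Adj c d

def Reach (arr : List (List Int)) (w : Int) (c d : Int × Int) : Prop :=
  Relation.ReflTransGen (Step arr w) c d

theorem adj_symm (c d : Int × Int) : Adj c d → Adj d c := by
  intro h
  simp only [Adj, nbrsB, List.mem_cons, Prod.ext_iff, List.not_mem_nil,
    or_false] at h ⊢
  obtain ⟨a, b⟩ := c; obtain ⟨e, f⟩ := d
  dsimp at h ⊢
  omega

theorem step_symm (arr : List (List Int)) (w : Int) (c d : Int × Int) :
    Step arr w c d → Step arr w d c := fun ⟨h1, h2, h3⟩ => ⟨h2, h1, adj_symm c d h3⟩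

theorem reach_symm (arr : List (List Int)) (w : Int) (c d : Int × Int) :
    Reach arr w c d → Reach arr w d c := by
  intro h
  exact Relation.ReflTransGen.symmetric (fun a b hab => step_symm arr w a b hab) h

theorem reach_above (arr : List (List Int)) (w : Int) (s c : Int × Int)
    (hs : Above arr w s) (h : Reach arr w s c) : Above arr w c := by
  induction h with
  | refl => exact hs
  | tail _ hstep _ => exact hstep.2.1

theorem above_mem_gridA (arr : List (List Int)) (w : Int) (c : Int × Int)
    (h : Above arr w c) : c ∈ gridA arr.length :=
  (mem_gridA _ _).2 ⟨h.1, h.2.1, h.2.2.1, h.2.2.2.1⟩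

-- properties of the inner 4-direction fold of A's BFS
theorem scan_mono_V (arr : List (List Int)) (w : Int) (x y : Int) :
    ∀ (ds : List (Int × Int)) (st : PySem.Set (Int × Int) × List (Int × Int)) (c : Int × Int),
    c ∈ st.1 → c ∈ (ds.foldl (dfsStep arr w x y) st).1 := by
  intro ds
  induction ds with
  | nil => intro st c h; exact h
  | cons d t ih =>
    intro st c h
    apply ih
    unfold dfsStep
    split
    · exact (PySem.Set.mem_add _ _ _).2 (Or.inl h)
    · exact h

theorem scan_newV (arr : List (List Int)) (w : Int) (x y : Int) :
    ∀ (ds : List (Int × Int)) (st : PySem.Set (Int × Int) × List (Int × Int)) (c : Int × Int),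
    c ∈ (ds.foldl (dfsStep arr w x y) st).1 →
    c ∈ st.1 ∨ ((∃ d ∈ ds, c = (d.1 + x, d.2 + y)) ∧ Above arr w c) := by
  intro ds
  induction ds with
  | nil => intro st c h; exact Or.inl h
  | cons d t ih =>
    intro st c h
    rcases ih _ c h with h1 | ⟨⟨d', hd', rfl⟩, hab⟩
    · unfold dfsStep at h1
      split at h1
      · rename_i hg
        rcases (PySem.Set.mem_add _ _ _).1 h1 with h2 | rfl
        · exact Or.inl h2
        · simp only [Bool.and_eq_true, decide_eq_true_eq] at hg
          exact Or.inr ⟨⟨d, List.mem_cons_self, rfl⟩,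
            ⟨hg.1.1.1.1.2, by have := hg.1.1.2; omega, hg.1.1.1.2, by have := hg.1.2; omega, hg.2⟩⟩
      · exact Or.inl h1
    · exact Or.inr ⟨⟨d', List.mem_cons_of_mem _ hd', rfl⟩, hab⟩

theorem scan_closure (arr : List (List Int)) (w : Int) (x y : Int) :
    ∀ (ds : List (Int × Int)) (st : PySem.Set (Int × Int) × List (Int × Int)) (d : Int × Int),
    d ∈ ds → Above arr w (d.1 + x, d.2 + y) →
    (d.1 + x, d.2 + y) ∈ (ds.foldl (dfsStep arr w x y) st).1 := by
  intro ds
  induction ds with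
  | nil => intro st d h; cases h
  | cons d0 t ih =>
    intro st d hd hab
    rcases List.mem_cons.1 hd with rfl | hdt
    · apply scan_mono_V arr w x y t
      unfold dfsStep
      split
      · exact (PySem.Set.mem_add _ _ _).2 (Or.inr rfl)
      · rename_i hg
        obtain ⟨h1, h2, h3, h4, h5⟩ := hab
        dsimp only at h1 h2 h3 h4 h5
        by_cases hc : PySem.Set.contains st.1 (d.1 + x, d.2 + y) = true
        · exact (PySem.Set.contains_iff _ _).1 hc
        · exfalso
          rw [Bool.not_eq_true] at hc
          apply hg
          simp only [Bool.and_eq_true, Bool.not_eq_true', decide_eq_true_eq]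
          exact ⟨⟨⟨⟨⟨hc, h1⟩, h3⟩, by omega⟩, by omega⟩, h5⟩
    · exact ih _ d hdt hab

theorem scan_mono_Q (arr : List (List Int)) (w : Int) (x y : Int) :
    ∀ (ds : List (Int × Int)) (st : PySem.Set (Int × Int) × List (Int × Int)) (c : Int × Int),
    c ∈ st.2 → c ∈ (ds.foldl (dfsStep arr w x y) st).2 := by
  intro ds
  induction ds with
  | nil => intro st c h; exact h
  | cons d t ih =>
    intro st c h
    apply ih
    unfold dfsStep
    split
    · exact List.mem_append.2 (Or.inl h)
    · exact h

theorem scan_newQ2 (arr : List (List Int)) (w : Int) (x y : Int) :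
    ∀ (ds : List (Int × Int)) (st : PySem.Set (Int × Int) × List (Int × Int)) (c : Int × Int),
    c ∈ (ds.foldl (dfsStep arr w x y) st).2 →
    c ∈ st.2 ∨ ((∃ d ∈ ds, c = (d.1 + x, d.2 + y)) ∧ Above arr w c) := by
  intro ds
  induction ds with
  | nil => intro st c h; exact Or.inl h
  | cons d t ih =>
    intro st c h
    rcases ih _ c h with h1 | ⟨⟨d', hd', rfl⟩, hab⟩
    · unfold dfsStep at h1
      split at h1
      · rename_i hg
        rcases List.mem_append.1 h1 with h2 | h2
        · exact Or.inl h2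
        · rcases List.mem_cons.1 h2 with rfl | h3
          · simp only [Bool.and_eq_true, decide_eq_true_eq] at hg
            exact Or.inr ⟨⟨d, List.mem_cons_self, rfl⟩,
              ⟨hg.1.1.1.1.2, by have := hg.1.1.2; omega, hg.1.1.1.2, by have := hg.1.2; omega, hg.2⟩⟩
          · cases h3
      · exact Or.inl h1
    · exact Or.inr ⟨⟨d', List.mem_cons_of_mem _ hd', rfl⟩, hab⟩

theorem scan_addedQ (arr : List (List Int)) (w : Int) (x y : Int) :
    ∀ (ds : List (Int × Int)) (st : PySem.Set (Int × Int) × List (Int × Int)) (c : Int × Int),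
    c ∈ (ds.foldl (dfsStep arr w x y) st).1 →
    c ∈ st.1 ∨ c ∈ (ds.foldl (dfsStep arr w x y) st).2 := by
  intro ds
  induction ds with
  | nil => intro st c h; exact Or.inl h
  | cons d t ih =>
    intro st c h
    rcases ih _ c h with h1 | h2
    · unfold dfsStep at h1
      split at h1
      · rename_i hg
        rcases (PySem.Set.mem_add _ _ _).1 h1 with h2 | rfl
        · exact Or.inl h2
        · right
          apply scan_mono_Q arr w x y t
          unfold dfsStep
          rw [if_pos hg]
          exact List.mem_append.2 (Or.inr List.mem_cons_self)
      · exact Or.inl h1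
    · exact Or.inr h2

theorem adj_iff_dirs (x y : Int) (c : Int × Int) :
    (∃ d ∈ ([((1 : Int), (0 : Int)), (0, 1), (-1, 0), (0, -1)] : List (Int × Int)),
      c = (d.1 + x, d.2 + y)) ↔ Adj (x, y) c := by
  obtain ⟨a, b⟩ := c
  simp only [Adj, nbrsB, List.mem_cons, List.not_mem_nil, or_false, Prod.ext_iff]
  constructor
  · rintro ⟨d, hd, h1, h2⟩
    rcases hd with ⟨e1, e2⟩ | ⟨e1, e2⟩ | ⟨e1, e2⟩ | ⟨e1, e2⟩ <;> omega
  · rintro (⟨h1, h2⟩ | ⟨h1, h2⟩ | ⟨h1, h2⟩ | ⟨h1, h2⟩)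
    · exact ⟨(1, 0), Or.inl ⟨rfl, rfl⟩, by dsimp; omega, by dsimp; omega⟩
    · exact ⟨(-1, 0), Or.inr (Or.inr (Or.inl ⟨rfl, rfl⟩)), by dsimp; omega, by dsimp; omega⟩
    · exact ⟨(0, 1), Or.inr (Or.inl ⟨rfl, rfl⟩), by dsimp; omega, by dsimp; omega⟩
    · exact ⟨(0, -1), Or.inr (Or.inr (Or.inr ⟨rfl, rfl⟩)), by dsimp; omega, by dsimp; omega⟩

theorem dfsLoop_nil (arr : List (List Int)) (w : Int) (V : PySem.Set (Int × Int)) :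
    dfsLoop arr w [] V = V := by
  rw [dfsLoop.eq_def]

theorem dfsLoop_cons (arr : List (List Int)) (w x y : Int) (rest : List (Int × Int))
    (V : PySem.Set (Int × Int)) :
    dfsLoop arr w ((x, y) :: rest) V =
      dfsLoop arr w (scanA arr w x y (V, rest)).2 (scanA arr w x y (V, rest)).1 := by
  rw [dfsLoop.eq_def]

set_option maxHeartbeats 1000000
theorem bfs_master (arr : List (List Int)) (w : Int) (s : Int × Int) (V₀ : PySem.Set (Int × Int))
    (habove : Above arr w s) (hdisj : ∀ c ∈ V₀, ¬ Reach arr w s c) :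
    ∀ (Q : List (Int × Int)) (V : PySem.Set (Int × Int)) (P : (Int × Int) → Prop),
    (∀ c ∈ Q, Reach arr w s c) →
    (∀ c ∈ V, c ∈ V₀ ∨ Reach arr w s c) →
    (∀ a b, P a → Step arr w a b → b ∈ V ∨ b ∈ Q ∨ P b) →
    (∀ c ∈ V, c ∈ V₀ ∨ P c ∨ c ∈ Q) →
    (P s ∨ s ∈ Q) →
    (∀ c ∈ Q, c = s ∨ c ∈ V) →
    (∀ c, P c → c = s ∨ c ∈ V) →
    (∀ c ∈ V, c ∈ dfsLoop arr w Q V) ∧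
    (∀ c ∈ dfsLoop arr w Q V, c ∈ V ∨ Reach arr w s c) ∧
    (∀ c, Reach arr w s c → c ≠ s → c ∈ dfsLoop arr w Q V) := by
  intro Q V
  induction Q, V using dfsLoop.induct arr w with
  | case1 V =>
    intro P h1 h2 h3 h5 h6 h7 h8
    rw [dfsLoop_nil]
    have hPs : P s := by
      rcases h6 with h | h
      · exact h
      · cases h
    have hPreach : ∀ c, Reach arr w s c → P c := by
      intro c hc
      induction hc with
      | refl => exact hPs
      | tail hb hstep ihb =>
        rename_i b c'
        rcases h3 b c' ihb hstep with hV | hQ | hP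
        · rcases h5 _ hV with h0 | hP | hQ
          · exact absurd (Relation.ReflTransGen.tail hb hstep) (hdisj _ h0)
          · exact hP
          · cases hQ
        · cases hQ
        · exact hP
    refine ⟨fun c hc => hc, fun c hc => Or.inl hc, ?_⟩
    intro c hc hne
    rcases Relation.ReflTransGen.cases_tail hc with h | ⟨b, hb, hstep⟩
    · exact absurd h hne
    · rcases h3 b c (hPreach b hb) hstep with hV | hQ | hP
      · exact hV
      · cases hQ
      · rcases h8 c hP with h | h
        · exact absurd h hne
        · exact h
  | case2 x y rest V ih =>
    intro P h1 h2 h3 h5 h6 h7 h8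
    rw [dfsLoop_cons]
    set st := scanA arr w x y (V, rest) with hst
    have hxyQ : (x, y) ∈ (x, y) :: rest := List.mem_cons_self
    have hreach_xy : Reach arr w s (x, y) := h1 _ hxyQ
    have hab_xy : Above arr w (x, y) := reach_above arr w s (x, y) habove hreach_xy
    -- the four properties of the scan
    have hmonoV : ∀ c ∈ V, c ∈ st.1 := fun c hc => by rw [hst]; exact scan_mono_V arr w x y _ (V, rest) c hc
    have hmonoQ : ∀ c ∈ rest, c ∈ st.2 := fun c hc => by rw [hst]; exact scan_mono_Q arr w x y _ (V, rest) c hc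
    have hnew_step : ∀ c, ((∃ d ∈ ([((1 : Int), (0 : Int)), (0, 1), (-1, 0), (0, -1)] :
        List (Int × Int)), c = (d.1 + x, d.2 + y)) ∧ Above arr w c) → Step arr w (x, y) c :=
      fun c ⟨hd, hab⟩ => ⟨hab_xy, hab, (adj_iff_dirs x y c).1 hd⟩
    have hnewV : ∀ c ∈ st.1, c ∈ V ∨ Step arr w (x, y) c := by
      intro c hc
      rw [hst] at hc
      rcases scan_newV arr w x y _ (V, rest) c hc with h | h
      · exact Or.inl h
      · exact Or.inr (hnew_step c h)
    have hnewQ2 : ∀ c ∈ st.2, c ∈ rest ∨ Step arr w (x, y) c := by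
      intro c hc
      rw [hst] at hc
      rcases scan_newQ2 arr w x y _ (V, rest) c hc with h | h
      · exact Or.inl h
      · exact Or.inr (hnew_step c h)
    have hclosed : ∀ b, Step arr w (x, y) b → b ∈ st.1 := by
      intro b hstep
      rcases (adj_iff_dirs x y b).2 hstep.2.2 with ⟨d, hd, rfl⟩
      rw [hst]
      exact scan_closure arr w x y _ (V, rest) d hd hstep.2.1
    have hreach_new : ∀ c, Step arr w (x, y) c → Reach arr w s c :=
      fun c hstep => Relation.ReflTransGen.tail hreach_xy hstep
    -- apply the induction hypothesis with the extended processed set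
    obtain ⟨C1, C2, C3⟩ := ih (fun c => P c ∨ c = (x, y))
      (by -- h1'
        intro c hc
        rcases hnewQ2 c hc with h | h
        · exact h1 c (List.mem_cons_of_mem _ h)
        · exact hreach_new c h)
      (by -- h2'
        intro c hc
        rcases hnewV c hc with h | h
        · exact h2 c h
        · exact Or.inr (hreach_new c h))
      (by -- h3'
        rintro a b (hPa | rfl) hstep
        · rcases h3 a b hPa hstep with h | h | h
          · exact Or.inl (hmonoV _ h)
          · rcases List.mem_cons.1 h with rfl | h
            · exact Or.inr (Or.inr (Or.inr rfl))
            · exact Or.inr (Or.inl (hmonoQ _ h))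
          · exact Or.inr (Or.inr (Or.inl h))
        · exact Or.inl (hclosed b hstep))
      (by -- h5'
        intro c hc
        rw [hst] at hc
        rcases scan_addedQ arr w x y _ (V, rest) c hc with h | h
        · rcases h5 c h with h0 | hP | hQ
          · exact Or.inl h0
          · exact Or.inr (Or.inl (Or.inl hP))
          · rcases List.mem_cons.1 hQ with rfl | h'
            · exact Or.inr (Or.inl (Or.inr rfl))
            · exact Or.inr (Or.inr (hmonoQ _ h'))
        · exact Or.inr (Or.inr h))
      (by -- h6'
        rcases h6 with h | h
        · exact Or.inl (Or.inl h)
        · rcases List.mem_cons.1 h with rfl | h'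
          · exact Or.inl (Or.inr rfl)
          · exact Or.inr (hmonoQ _ h'))
      (by -- h7'
        intro c hc
        rcases hnewQ2 c hc with h | h
        · rcases h7 c (List.mem_cons_of_mem _ h) with h' | h'
          · exact Or.inl h'
          · exact Or.inr (hmonoV _ h')
        · exact Or.inr (hclosed c h))
      (by -- h8'
        rintro c (hP | rfl)
        · rcases h8 c hP with h | h
          · exact Or.inl h
          · exact Or.inr (hmonoV _ h)
        · rcases h7 _ hxyQ with h | h
          · exact Or.inl h
          · exact Or.inr (hmonoV _ h))
    refine ⟨fun c hc => C1 c (hmonoV _ hc), ?_, C3⟩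
    intro c hc
    rcases C2 c hc with h | h
    · rcases hnewV c h with h' | h'
      · exact Or.inl h'
      · exact Or.inr (hreach_new c h')
    · exact Or.inr h

theorem dfs_correct (arr : List (List Int)) (w : Int) (s : Int × Int) (V₀ : PySem.Set (Int × Int))
    (habove : Above arr w s) (hdisj : ∀ c ∈ V₀, ¬ Reach arr w s c) :
    (∀ c ∈ V₀, c ∈ dfsLoop arr w [s] V₀) ∧
    (∀ c ∈ dfsLoop arr w [s] V₀, c ∈ V₀ ∨ Reach arr w s c) ∧
    (∀ c, Reach arr w s c → c ≠ s → c ∈ dfsLoop arr w [s] V₀) := by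
  refine bfs_master arr w s V₀ habove hdisj [s] V₀ (fun _ => False) ?_ ?_ ?_ ?_ ?_ ?_ ?_
  · intro c hc
    rcases List.mem_cons.1 hc with rfl | h
    · exact Relation.ReflTransGen.refl
    · cases h
  · exact fun c hc => Or.inl hc
  · rintro a b hP
    cases hP
  · exact fun c hc => Or.inl hc
  · exact Or.inr List.mem_cons_self
  · intro c hc
    rcases List.mem_cons.1 hc with rfl | h
    · exact Or.inl rfl
    · cases h
  · rintro c hP
    cases hP

-- ===== closure (B) side =====
theorem mem_foldl_addIf (p : (Int × Int) → Bool) :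
    ∀ (L : List (Int × Int)) (f0 : PySem.Set (Int × Int)) (x : Int × Int),
    (x ∈ L.foldl (fun f c => if p c then PySem.Set.add f c else f) f0) ↔
      x ∈ f0 ∨ (x ∈ L ∧ p x = true) := by
  intro L
  induction L with
  | nil => intro f0 x; simp
  | cons a t ih =>
    intro f0 x
    rw [List.foldl_cons, ih]
    by_cases ha : p a = true
    · rw [if_pos ha]
      constructor
      · rintro (h | h)
        · rcases (PySem.Set.mem_add _ _ _).1 h with h' | rfl
          · exact Or.inl h'
          · exact Or.inr ⟨List.mem_cons_self, ha⟩
        · exact Or.inr ⟨List.mem_cons_of_mem _ h.1, h.2⟩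
      · rintro (h | ⟨hm, hp⟩)
        · exact Or.inl ((PySem.Set.mem_add _ _ _).2 (Or.inl h))
        · rcases List.mem_cons.1 hm with rfl | h'
          · exact Or.inl ((PySem.Set.mem_add _ _ _).2 (Or.inr rfl))
          · exact Or.inr ⟨h', hp⟩
    · rw [if_neg ha]
      constructor
      · rintro (h | ⟨hm, hp⟩)
        · exact Or.inl h
        · exact Or.inr ⟨List.mem_cons_of_mem _ hm, hp⟩
      · rintro (h | ⟨hm, hp⟩)
        · exact Or.inl h
        · rcases List.mem_cons.1 hm with rfl | h'
          · exact absurd hp (by simp [ha])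
          · exact Or.inr ⟨h', hp⟩

theorem mem_frontierB (arr : List (List Int)) (w : Int) (comp : PySem.Set (Int × Int))
    (b : Int × Int) :
    b ∈ frontierB arr w comp ↔ (∃ a ∈ comp, Adj a b) ∧ b ∉ comp ∧ Above arr w b := by
  have key : ∀ (cs : List (Int × Int)) (f0 : PySem.Set (Int × Int)),
      (b ∈ cs.foldl (fun f c =>
        (nbrsB c).foldl (fun (f : PySem.Set (Int × Int)) nb =>
          if decide (0 ≤ nb.1) && decide (nb.1 < (arr.length : Int)) &&
             decide (0 ≤ nb.2) && decide (nb.2 < (arr.length : Int)) &&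
             !(comp.contains nb) && decide (valA arr nb.1 nb.2 > w)
          then f.add nb else f) f) f0) ↔
      b ∈ f0 ∨ ((∃ a ∈ cs, Adj a b) ∧
        (decide (0 ≤ b.1) && decide (b.1 < (arr.length : Int)) &&
         decide (0 ≤ b.2) && decide (b.2 < (arr.length : Int)) &&
         !(comp.contains b) && decide (valA arr b.1 b.2 > w)) = true) := by
    intro cs
    induction cs with
    | nil => intro f0; simp
    | cons a t ih =>
      intro f0
      rw [List.foldl_cons, ih, mem_foldl_addIf]
      constructor
      · rintro ((h | ⟨hm, hp⟩) | ⟨⟨a', ha', hadj⟩, hp⟩)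
        · exact Or.inl h
        · exact Or.inr ⟨⟨a, List.mem_cons_self, hm⟩, hp⟩
        · exact Or.inr ⟨⟨a', List.mem_cons_of_mem _ ha', hadj⟩, hp⟩
      · rintro (h | ⟨⟨a', ha', hadj⟩, hp⟩)
        · exact Or.inl (Or.inl h)
        · rcases List.mem_cons.1 ha' with rfl | h'
          · exact Or.inl (Or.inr ⟨hadj, hp⟩)
          · exact Or.inr ⟨⟨a', h', hadj⟩, hp⟩
  unfold frontierB
  rw [key]
  simp only [PySem.Set.empty]
  constructor
  · rintro (h | ⟨hex, hp⟩)
    · cases h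
    · simp only [Bool.and_eq_true, Bool.not_eq_true', decide_eq_true_eq] at hp
      obtain ⟨⟨⟨⟨⟨ha, hb⟩, hc⟩, hd⟩, he⟩, hf⟩ := hp
      refine ⟨hex, ?_, ha, hb, hc, hd, hf⟩
      intro hm
      rw [(PySem.Set.contains_iff _ _).2 hm] at he
      cases he
  · rintro ⟨hex, hnm, h1, h2, h3, h4, h5⟩
    right
    refine ⟨hex, ?_⟩
    simp only [Bool.and_eq_true, Bool.not_eq_true', decide_eq_true_eq]
    exact ⟨⟨⟨⟨⟨h1, h2⟩, h3⟩, h4⟩, (set_contains_false_iff _ _).2 hnm⟩, h5⟩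

theorem closureB_mono (arr : List (List Int)) (w : Int) :
    ∀ (k : Nat) (comp : PySem.Set (Int × Int)) (x : Int × Int),
    x ∈ comp → x ∈ closureB arr w k comp := by
  intro k
  induction k with
  | zero => intro comp x h; exact h
  | succ k ih =>
    intro comp x h
    rw [closureB]
    split
    · exact h
    · exact ih _ x ((PySem.Set.mem_union _ _ _).2 (Or.inl h))

theorem closureB_reach (arr : List (List Int)) (w : Int) (s : Int × Int) (habove : Above arr w s) :
    ∀ (k : Nat) (comp : PySem.Set (Int × Int)),
    (∀ a ∈ comp, Reach arr w s a) →
    ∀ c ∈ closureB arr w k comp, Reach arr w s c := by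
  intro k
  induction k with
  | zero => intro comp h c hc; exact h c hc
  | succ k ih =>
    intro comp h c hc
    rw [closureB] at hc
    split at hc
    · exact h c hc
    · refine ih _ ?_ c hc
      intro a ha
      rcases (PySem.Set.mem_union _ _ _).1 ha with h' | h'
      · exact h a h'
      · obtain ⟨⟨a', ha', hadj⟩, _, hab⟩ := (mem_frontierB arr w comp a).1 h'
        have hra' : Reach arr w s a' := h a' ha'
        exact Relation.ReflTransGen.tail hra'
          ⟨reach_above arr w s a' habove hra', hab, hadj⟩

theorem length_gridA (n : Nat) : (gridA n).length = n * n := by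
  simp [gridA, List.length_flatMap, List.sum_replicate]

theorem nodup_length_le (l l' : List (Int × Int)) (h : l.Nodup) (hs : l ⊆ l') :
    l.length ≤ l'.length :=
  calc l.length = l.toFinset.card := (List.toFinset_card_of_nodup h).symm
    _ ≤ l'.toFinset.card :=
        Finset.card_le_card (fun _x hx => List.mem_toFinset.2 (hs (List.mem_toFinset.1 hx)))
    _ ≤ l'.length := List.toFinset_card_le l'

theorem union_grows (x : Int × Int) :
    ∀ (t s : PySem.Set (Int × Int)), x ∈ t → x ∉ s →
    s.length + 1 ≤ (PySem.Set.union s t).length := by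
  have pref : ∀ (t s : PySem.Set (Int × Int)), ∃ r, PySem.Set.union s t = s ++ r := by
    intro t
    induction t with
    | nil =>
      intro s
      exact ⟨[], by simp [PySem.Set.union, PySem.Set.update]⟩
    | cons a t ih =>
      intro s
      obtain ⟨r, hr⟩ := ih (s.add a)
      rw [PySem.Set.union_eq_update] at hr ⊢
      have hstep : PySem.Set.update s (a :: t) = PySem.Set.update (s.add a) t := rfl
      rw [hstep, hr, PySem.Set.add_eq_ite]
      split
      · exact ⟨r, rfl⟩
      · exact ⟨[a] ++ r, by rw [← List.append_assoc]⟩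
  intro t s hxt hxs
  obtain ⟨r, hr⟩ := pref t s
  have hx : x ∈ s ++ r := by
    rw [← hr]
    exact (PySem.Set.mem_union _ _ _).2 (Or.inr hxt)
  have hr' : r ≠ [] := by
    rintro rfl
    rw [List.append_nil] at hx
    exact hxs hx
  rw [hr, List.length_append]
  have : 0 < r.length := List.length_pos_iff.2 hr'
  omega

theorem closureB_closed (arr : List (List Int)) (w : Int) :
    ∀ (k : Nat) (comp : PySem.Set (Int × Int)),
    comp.Nodup → (∀ a ∈ comp, Above arr w a) →
    arr.length * arr.length + 1 ≤ k + comp.length →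
    ∀ a ∈ closureB arr w k comp, ∀ b, Step arr w a b → b ∈ closureB arr w k comp := by
  intro k
  induction k with
  | zero =>
    intro comp hnd hab hlen
    exfalso
    have hsub : comp ⊆ gridA arr.length := fun c hc => above_mem_gridA arr w c (hab c hc)
    have := nodup_length_le comp (gridA arr.length) hnd hsub
    rw [length_gridA] at this
    omega
  | succ k ih =>
    intro comp hnd hab hlen a ha b hstep
    rw [closureB] at ha ⊢
    split at ha
    · rename_i hemp
      -- frontier empty: comp is closed
      rw [List.isEmpty_iff] at hemp
      by_cases hb : b ∈ comp
      · simpa [closureB, hemp] using hb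
      · exfalso
        have : b ∈ frontierB arr w comp :=
          (mem_frontierB arr w comp b).2 ⟨⟨a, ha, hstep.2.2⟩, hb, hstep.2.1⟩
        rw [hemp] at this
        cases this
    · rename_i hemp
      rw [if_neg hemp]
      obtain ⟨c0, hc0⟩ : ∃ c0, c0 ∈ frontierB arr w comp := by
        refine List.exists_mem_of_ne_nil _ ?_
        intro hnil
        exact hemp (by rw [hnil]; rfl)
      obtain ⟨_, hc0nm, _⟩ := (mem_frontierB arr w comp c0).1 hc0
      refine ih (PySem.Set.union comp (frontierB arr w comp)) (PySem.Set.nodup_union _ _ hnd) ?_ ?_ a ha b hstep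
      · intro c hc
        rcases (PySem.Set.mem_union _ _ _).1 hc with h' | h'
        · exact hab c h'
        · exact ((mem_frontierB arr w comp c).1 h').2.2
      · have := union_grows c0 (frontierB arr w comp) comp hc0 hc0nm
        omega

theorem reach_sub (arr : List (List Int)) (w : Int) (s : Int × Int) (X : (Int × Int) → Prop)
    (hs : X s) (hcl : ∀ a, X a → ∀ b, Step arr w a b → X b) :
    ∀ c, Reach arr w s c → X c := by
  intro c hr
  induction hr with
  | refl => exact hs
  | tail hb hstep ihb => exact hcl _ ihb _ hstep

theorem closureB_iff (arr : List (List Int)) (w : Int) (s : Int × Int) (habove : Above arr w s)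
    (c : Int × Int) :
    c ∈ closureB arr w (arr.length * arr.length) [s] ↔ Reach arr w s c := by
  constructor
  · intro hc
    refine closureB_reach arr w s habove _ [s] ?_ c hc
    intro a ha
    rcases List.mem_cons.1 ha with rfl | h
    · exact Relation.ReflTransGen.refl
    · cases h
  · refine reach_sub arr w s _ ?_ ?_ c
    · exact closureB_mono arr w _ [s] s List.mem_cons_self
    · intro a ha b hstep
      refine closureB_closed arr w (arr.length * arr.length) [s]
        (List.nodup_singleton s) ?_ (by simp) a ha b hstep
      intro a' ha'
      rcases List.mem_cons.1 ha' with rfl | h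
      · exact habove
      · cases h

-- ===== scan-order lemmas =====
def lexLt (t c : Int × Int) : Prop := t.1 < c.1 ∨ (t.1 = c.1 ∧ t.2 < c.2)

theorem tupGe_false_iff (t c : Int × Int) : tupGe t c = false ↔ lexLt t c := by
  simp only [tupGe, lexLt, decide_eq_false_iff_not, not_or, not_and, not_lt, not_le]
  constructor
  · rintro ⟨h1, h2⟩
    rcases lt_or_ge t.1 c.1 with h | h
    · exact Or.inl h
    · have : t.1 = c.1 := le_antisymm h1 h
      exact Or.inr ⟨this, by have := h2 this.symm; omega⟩
  · rintro (h | ⟨h1, h2⟩)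
    · exact ⟨le_of_lt h, fun he => absurd he.symm (by omega)⟩
    · exact ⟨le_of_eq h1, fun _ => by omega⟩

theorem gridA_pairwise (n : Nat) : (gridA n).Pairwise lexLt := by
  unfold gridA
  rw [List.pairwise_flatMap]
  constructor
  · intro i _
    rw [List.pairwise_map]
    exact (List.pairwise_lt_range).imp (fun {j1 j2} h => Or.inr ⟨rfl, by dsimp; exact_mod_cast h⟩)
  · refine (List.pairwise_lt_range).imp ?_
    intro i1 i2 h x hx y hy
    obtain ⟨j1, _, rfl⟩ := List.mem_map.1 hx
    obtain ⟨j2, _, rfl⟩ := List.mem_map.1 hy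
    exact Or.inl (by dsimp; exact_mod_cast h)

theorem nodup_gridA (n : Nat) : (gridA n).Nodup :=
  (gridA_pairwise n).imp (fun {a b} h => by
    rintro rfl
    rcases h with h | ⟨_, h⟩ <;> omega)

-- ===== outer loop =====
def stepAq (arr : List (List Int)) (w : Int) (st : PySem.Set (Int × Int) × Int)
    (c : Int × Int) : PySem.Set (Int × Int) × Int :=
  if decide (valA arr c.1 c.2 > w) && !(st.1.contains c) then
    (dfsLoop arr w [c] st.1, st.2 + 1)
  else st

def stepBq (arr : List (List Int)) (w : Int) (cnt : Int) (c : Int × Int) : Int :=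
  if decide (valA arr c.1 c.2 > w) &&
     (closureB arr w (arr.length * arr.length) [c]).all (fun t => tupGe t c)
  then cnt + 1 else cnt

theorem maze_dfs_eq (arr : List (List Int)) (w : Int) :
    maze_dfs arr w = ((gridA arr.length).foldl (stepAq arr w) (PySem.Set.empty, 0)).2 := by
  unfold maze_dfs gridA
  rw [List.foldl_flatMap]
  simp only [PySem.List.pyRange_zero_natCast, List.foldl_map]
  rfl

theorem maze_dfs_alt_eq (arr : List (List Int)) (w : Int) :
    maze_dfs_alt arr w = (gridA arr.length).foldl (stepBq arr w) 0 := by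
  unfold maze_dfs_alt gridA
  rw [List.foldl_flatMap]
  simp only [PySem.List.pyRange_zero_natCast, List.foldl_map]
  rfl

def ConnL (arr : List (List Int)) (w : Int) (L : List (Int × Int)) (c : Int × Int) : Prop :=
  ∃ d ∈ L, Above arr w d ∧ Reach arr w d c

theorem outer_eq (arr : List (List Int)) (w : Int) :
    ∀ (R L : List (Int × Int)) (V : PySem.Set (Int × Int)) (cnt : Int),
    gridA arr.length = L ++ R →
    (∀ c ∈ V, ConnL arr w L c) →
    (∀ c, ConnL arr w L c → c ∈ L ∨ c ∈ V) →
    (R.foldl (stepAq arr w) (V, cnt)).2 = R.foldl (stepBq arr w) cnt := by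
  intro R
  induction R with
  | nil => intro L V cnt _ _ _; rfl
  | cons c R' ih =>
    intro L V cnt hsplit hi1 hi2
    have hcg : c ∈ gridA arr.length := hsplit ▸ List.mem_append.2 (Or.inr List.mem_cons_self)
    have hbounds := (mem_gridA _ c).1 hcg
    have hcL : c ∉ L := by
      have hnd := nodup_gridA arr.length
      rw [hsplit, List.nodup_append] at hnd
      intro hmem
      exact hnd.2.2 c hmem c List.mem_cons_self rfl
    have hpair := gridA_pairwise arr.length
    rw [hsplit, List.pairwise_append] at hpair
    have hLlt : ∀ t ∈ L, lexLt t c := fun t ht => hpair.2.2 t ht c List.mem_cons_self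
    have hRlt : ∀ t ∈ R', lexLt c t := fun t ht => (List.pairwise_cons.1 hpair.2.1).1 t ht
    have hLiff : ∀ t, t ∈ gridA arr.length → lexLt t c → t ∈ L := by
      intro t htg hlt
      rw [hsplit] at htg
      rcases List.mem_append.1 htg with h | h
      · exact h
      · exfalso
        rcases List.mem_cons.1 h with rfl | h'
        · rcases hlt with h | ⟨_, h⟩ <;> omega
        · have h2 := hRlt t h'
          rcases hlt with h | ⟨e, h⟩ <;> rcases h2 with h2 | ⟨e2, h2⟩ <;> omega
    have hsplit' : gridA arr.length = (L ++ [c]) ++ R' := by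
      rw [List.append_assoc]
      exact hsplit
    rw [List.foldl_cons, List.foldl_cons]
    by_cases hval : valA arr c.1 c.2 > w
    · have habc : Above arr w c := ⟨hbounds.1, hbounds.2.1, hbounds.2.2.1, hbounds.2.2.2, hval⟩
      by_cases hcV : c ∈ V
      · -- already visited: neither side counts
        have hA : stepAq arr w (V, cnt) c = (V, cnt) := by
          unfold stepAq
          rw [if_neg]
          simp
          exact fun _ => hcV
        obtain ⟨d, hdL, habd, hrd⟩ := hi1 c hcV
        have hB : stepBq arr w cnt c = cnt := by
          unfold stepBq
          rw [if_neg]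
          have hdc : d ∈ closureB arr w (arr.length * arr.length) [c] :=
            (closureB_iff arr w c habc d).2 (reach_symm arr w d c hrd)
          have hge : tupGe d c = false := (tupGe_false_iff d c).2 (hLlt d hdL)
          have hall : (closureB arr w (arr.length * arr.length) [c]).all
              (fun t => tupGe t c) = false :=
            List.all_eq_false.2 ⟨d, hdc, by simp [hge]⟩
          simp [hall]
        rw [hA, hB]
        refine ih (L ++ [c]) V cnt hsplit' ?_ ?_
        · intro t htV
          obtain ⟨d0, hd0, hab0, hr0⟩ := hi1 t htV
          exact ⟨d0, List.mem_append.2 (Or.inl hd0), hab0, hr0⟩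
        · rintro t ⟨d0, hd0, hab0, hr0⟩
          rcases List.mem_append.1 hd0 with h | h
          · rcases hi2 t ⟨d0, h, hab0, hr0⟩ with h' | h'
            · exact Or.inl (List.mem_append.2 (Or.inl h'))
            · exact Or.inr h'
          · rcases List.mem_cons.1 h with rfl | h'
            · rcases hi2 t ⟨d, hdL, habd, Relation.ReflTransGen.trans hrd hr0⟩ with h' | h'
              · exact Or.inl (List.mem_append.2 (Or.inl h'))
              · exact Or.inr h'
            · cases h'
      · -- new component: both sides count
        have hA : stepAq arr w (V, cnt) c = (dfsLoop arr w [c] V, cnt + 1) := by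
          unfold stepAq
          rw [if_pos]
          simp [hval]
          exact hcV
        have hdisj : ∀ t ∈ V, ¬ Reach arr w c t := by
          intro t htV hr
          obtain ⟨d0, hd0, hab0, hr0⟩ := hi1 t htV
          rcases hi2 c ⟨d0, hd0, hab0,
            Relation.ReflTransGen.trans hr0 (reach_symm arr w c t hr)⟩ with h' | h'
          · exact hcL h'
          · exact hcV h'
        obtain ⟨D1, D2, D3⟩ := dfs_correct arr w c V habc hdisj
        have hB : stepBq arr w cnt c = cnt + 1 := by
          unfold stepBq
          rw [if_pos]
          have hall : (closureB arr w (arr.length * arr.length) [c]).all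
              (fun t => tupGe t c) = true := by
            refine List.all_eq_true.2 ?_
            intro t htc
            cases ht : tupGe t c
            · exfalso
              have hlt := (tupGe_false_iff t c).1 ht
              have hrt : Reach arr w c t := (closureB_iff arr w c habc t).1 htc
              have habt : Above arr w t := reach_above arr w c t habc hrt
              have htL : t ∈ L := hLiff t (above_mem_gridA arr w t habt) hlt
              rcases hi2 c ⟨t, htL, habt, reach_symm arr w c t hrt⟩ with h' | h'
              · exact hcL h'
              · exact hcV h'
            · rfl
          simp [hval, hall]
        rw [hA, hB]
        refine ih (L ++ [c]) (dfsLoop arr w [c] V) (cnt + 1) hsplit' ?_ ?_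
        · intro t htV'
          rcases D2 t htV' with h | h
          · obtain ⟨d0, hd0, hab0, hr0⟩ := hi1 t h
            exact ⟨d0, List.mem_append.2 (Or.inl hd0), hab0, hr0⟩
          · exact ⟨c, List.mem_append.2 (Or.inr List.mem_cons_self), habc, h⟩
        · rintro t ⟨d0, hd0, hab0, hr0⟩
          rcases List.mem_append.1 hd0 with h | h
          · rcases hi2 t ⟨d0, h, hab0, hr0⟩ with h' | h'
            · exact Or.inl (List.mem_append.2 (Or.inl h'))
            · exact Or.inr (D1 t h')
          · rcases List.mem_cons.1 h with rfl | h'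
            · by_cases hne : t = d0
              · exact Or.inl (List.mem_append.2 (Or.inr (hne ▸ List.mem_cons_self)))
              · exact Or.inr (D3 t hr0 hne)
            · cases h'
    · -- cell not above water: neither side counts, connectivity unchanged
      have hA : stepAq arr w (V, cnt) c = (V, cnt) := by
        unfold stepAq
        rw [if_neg]
        simp [hval]
      have hB : stepBq arr w cnt c = cnt := by
        unfold stepBq
        rw [if_neg]
        simp [hval]
      rw [hA, hB]
      refine ih (L ++ [c]) V cnt hsplit' ?_ ?_
      · intro t htV
        obtain ⟨d0, hd0, hab0, hr0⟩ := hi1 t htV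
        exact ⟨d0, List.mem_append.2 (Or.inl hd0), hab0, hr0⟩
      · rintro t ⟨d0, hd0, hab0, hr0⟩
        rcases List.mem_append.1 hd0 with h | h
        · rcases hi2 t ⟨d0, h, hab0, hr0⟩ with h' | h'
          · exact Or.inl (List.mem_append.2 (Or.inl h'))
          · exact Or.inr h'
        · rcases List.mem_cons.1 h with rfl | h'
          · exact absurd hab0.2.2.2.2 hval
          · cases h'

theorem ports_agree (arr : List (List Int)) (w : Int) : maze_dfs arr w = maze_dfs_alt arr w := by
  rw [maze_dfs_eq, maze_dfs_alt_eq]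
  refine outer_eq arr w (gridA arr.length) [] PySem.Set.empty 0 rfl ?_ ?_
  · intro c hc
    cases hc
  · rintro c ⟨d, hd, _, _⟩
    cases hd

-- ===== VERDICT (by name: the statement is the Claim_ definition above) =====
theorem maze_dfs_spec : Claim_equal_maze_dfs := by
  intro arr waterLevel _ _
  unfold Spec_maze_dfs
  exact ports_agree arr waterLevel
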